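-- pv_equiv track=rewrite | github.com/gino-terlingen/iot-python | labo07/8-2.py | panekoek
-- ===== SOURCE A (Python) =====
-- def panekoek(test, test1):
--     pro = 0
--     pot = []
--     for x in test:
--         if x in pot:
--             continue
--         pot.append(x)
--         if x in test1:
--             pro = pro+1
--     return pro
-- ===== SOURCE B (Python) =====
-- def panekoek(test, test1):
--     a = sorted(set(test))
--     b = sorted(set(test1))
--     i = j = pro = 0
--     while i < len(a) and j < len(b):
--         if a[i] < b[j]:
--             i += 1
--         elif b[j] < a[i]:
--             j += 1
--         else:
--             pro += 1
--             i += 1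
--             j += 1
--     return pro
-- ===== Notes on version B (the rewrite author's own statement) =====
-- stated objective: faster
-- what changed: Replaces A's incremental dedup-list with quadratic membership scans by a sort-then-merge algorithm: sort the distinct elements of both lists and count matches with a two-pointer merge.
import Mathlib
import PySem

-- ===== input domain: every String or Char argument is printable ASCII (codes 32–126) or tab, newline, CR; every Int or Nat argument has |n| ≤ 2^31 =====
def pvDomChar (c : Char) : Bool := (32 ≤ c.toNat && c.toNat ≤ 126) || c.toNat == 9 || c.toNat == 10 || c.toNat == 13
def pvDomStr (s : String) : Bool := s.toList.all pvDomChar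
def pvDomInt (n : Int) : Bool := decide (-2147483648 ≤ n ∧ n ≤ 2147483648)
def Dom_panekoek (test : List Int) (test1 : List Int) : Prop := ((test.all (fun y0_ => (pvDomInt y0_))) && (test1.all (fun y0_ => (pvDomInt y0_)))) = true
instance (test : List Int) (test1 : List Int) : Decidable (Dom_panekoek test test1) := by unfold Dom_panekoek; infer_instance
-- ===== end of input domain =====

-- B replaces A's dedup-list loop with sort-then-merge: sort the distinct elements of both lists,
-- then count common elements with a two-pointer merge.

-- ===== PORT A =====
-- loop state: (pro, pot)
def panekoek (test : List Int) (test1 : List Int) : Int :=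
  (test.foldl (fun (st : Int × List Int) x =>
      if st.2.contains x then st
      else ((if test1.contains x then st.1 + 1 else st.1), st.2 ++ [x]))
    (0, [])).1

-- ===== PORT B =====
-- the two-pointer while loop of Source B: each branch advances past a[i] and/or b[j]
def panekoekMerge : List Int → List Int → Int
  | [], _ => 0
  | _ :: _, [] => 0
  | x :: as', y :: bs =>
    if x < y then panekoekMerge as' (y :: bs)
    else if y < x then panekoekMerge (x :: as') bs
    else 1 + panekoekMerge as' bs
termination_by a b => a.length + b.length

def panekoek_alt (test : List Int) (test1 : List Int) : Int :=
  panekoekMerge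
    (PySem.List.sorted (PySem.Set.ofList test) (fun x => x) false)
    (PySem.List.sorted (PySem.Set.ofList test1) (fun x => x) false)

-- ===== PRECONDITION & SPEC =====
def Spec_panekoek (test : List Int) (test1 : List Int) (out : Int) : Prop := out = panekoek_alt test test1
instance (test : List Int) (test1 : List Int) (out : Int) : Decidable (Spec_panekoek test test1 out) := by unfold Spec_panekoek; infer_instance

-- ===== CLAIM (what is proved, stated in full; the proofs are below) =====
def Claim_equal_panekoek : Prop := ∀ (test : List Int) (test1 : List Int), Dom_panekoek test test1 → Spec_panekoek test test1 (panekoek test test1)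

-- ===== LEMMAS AND PROOFS =====

-- A's loop invariant: the counter plus the hits already in pot equals the hits in pot extended by xs.
lemma panekoek_loop_inv (test1 : List Int) :
    ∀ (xs pot : List Int) (pro : Int),
      (xs.foldl (fun (st : Int × List Int) x =>
          if st.2.contains x then st
          else ((if test1.contains x then st.1 + 1 else st.1), st.2 ++ [x])) (pro, pot)).1
        + ((pot.filter (fun y => test1.contains y)).length : Int)
      = pro + (((PySem.Set.update pot xs).filter (fun y => test1.contains y)).length : Int) := by
  intro xs
  induction xs with
  | nil => intro pot pro; simp [PySem.Set.update]
  | cons x xs ih =>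
    intro pot pro
    by_cases h : x ∈ pot
    · have hadd : PySem.Set.add pot x = pot := by
        simp [PySem.Set.add, PySem.Set.contains, h]
      have := ih pot pro
      simp only [PySem.Set.update, List.foldl_cons, hadd] at this ⊢
      simpa [h] using this
    · have hadd : PySem.Set.add pot x = pot ++ [x] := by
        simp [PySem.Set.add, PySem.Set.contains, h]
      have hih := ih (pot ++ [x]) (if test1.contains x then pro + 1 else pro)
      simp only [PySem.Set.update, List.foldl_cons, hadd] at hih ⊢
      have hlen : (((pot ++ [x]).filter (fun y => test1.contains y)).length : Int)
          = ((pot.filter (fun y => test1.contains y)).length : Int)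
            + (if x ∈ test1 then 1 else 0) := by
        by_cases ht : x ∈ test1 <;> simp [List.filter_append, ht]
      by_cases ht : x ∈ test1 <;>
        · simp only [ht, if_true, if_false] at hih hlen ⊢
          simp [h, ht] at hih hlen ⊢
          omega

-- The merge counts, on strictly increasing lists, the elements of a that occur in b.
lemma panekoekMerge_eq : ∀ (a b : List Int), a.Pairwise (· < ·) → b.Pairwise (· < ·) →
    panekoekMerge a b = ((a.filter (fun x => b.contains x)).length : Int)
  | [], _, _, _ => by simp [panekoekMerge]
  | _ :: _, [], _, _ => by simp [panekoekMerge]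
  | x :: as', y :: bs, ha, hb => by
    rcases List.pairwise_cons.mp ha with ⟨hxa, ha'⟩
    rcases List.pairwise_cons.mp hb with ⟨hyb, hb'⟩
    by_cases hxy : x < y
    · -- x is smaller than every element of y :: bs, hence not present
      have hx : x ∉ y :: bs := by
        intro hmem
        rcases List.mem_cons.mp hmem with rfl | hmem
        · omega
        · exact absurd hxy (by have := hyb x hmem; omega)
      have hxb : x ∉ bs := fun hm => hx (List.mem_cons_of_mem _ hm)
      have hxy' : ¬ x = y := by omega
      rw [panekoekMerge]
      simp only [hxy, if_true]
      rw [panekoekMerge_eq as' (y :: bs) ha' hb]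
      simp [hxy', hxb]
    · by_cases hyx : y < x
      · -- y is smaller than every element of x :: as', so membership in y :: bs reduces to bs
        have hfc : (x :: as').filter (fun z => (y :: bs).contains z)
            = (x :: as').filter (fun z => bs.contains z) := by
          apply List.filter_congr
          intro z hz
          have hyz : y < z := by
            rcases List.mem_cons.mp hz with rfl | hz
            · exact hyx
            · have := hxa z hz; omega
          have hzy : ¬ z = y := by omega
          simp [hzy]
        rw [panekoekMerge]
        simp only [hxy, if_false, hyx, if_true]
        rw [panekoekMerge_eq (x :: as') bs ha hb', hfc]
      · -- x = y: a hit; the tails continue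
        have hxy' : x = y := by omega
        subst hxy'
        have hfc : as'.filter (fun z => decide (z = x ∨ z ∈ bs))
            = as'.filter (fun z => decide (z ∈ bs)) := by
          apply List.filter_congr
          intro z hz
          have hzx : ¬ z = x := by have := hxa z hz; omega
          simp [hzx]
        rw [panekoekMerge]
        simp only [lt_irrefl, if_false]
        rw [panekoekMerge_eq as' bs ha' hb']
        simp only [List.contains_eq_mem, List.filter_cons, List.mem_cons, true_or,
          decide_true, if_true, List.length_cons, hfc]
        omega
termination_by a b => a.length + b.length

-- ===== VERDICT (by name: the statement is the Claim_ definition above) =====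
theorem panekoek_spec : Claim_equal_panekoek := by
  intro test test1 _
  unfold Spec_panekoek panekoek panekoek_alt
  -- B's side: merge of sorted distinct lists counts the distinct common elements
  have hsa := PySem.List.sorted_ofList_pairwise_lt (xs := test)
  have hsb := PySem.List.sorted_ofList_pairwise_lt (xs := test1)
  rw [panekoekMerge_eq _ _ hsa hsb]
  -- rewrite membership in the sorted dedup of test1 to membership in test1
  rw [show (fun x : Int =>
        (PySem.List.sorted (PySem.Set.ofList test1) (fun x => x) false).contains x)
      = (fun x : Int => test1.contains x) from
    funext (fun z => by
      simp [PySem.List.mem_sorted, PySem.Set.mem_ofList])]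
  -- replace the sorted list by ofList test via the permutation
  have hperm : (PySem.List.sorted (PySem.Set.ofList test) (fun x => x) false).Perm
      (PySem.Set.ofList test) := PySem.List.sorted_perm _ _ _
  rw [(hperm.filter _).length_eq]
  -- A's side: the loop invariant at the initial state
  have h := panekoek_loop_inv test1 test [] 0
  simp only [PySem.Set.update] at h
  simpa [PySem.Set.ofList, PySem.Set.empty] using h
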